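-- pv_equiv track=rewrite | github.com/mckk12/Advent-Of-Code-2025 | Day-10/factory1.py | calculate_buttons_seq
-- ===== SOURCE A (Python) =====
-- from collections import deque
--
-- def calculate_buttons_seq(machine):
--     lights, buttons = machine[0], machine[1:-1]
--     buttons = [list(map(int, button.strip("()").split(","))) for button in buttons]
--     lights = list(map(lambda x: 0 if x=="." else 1, lights.strip("[]")))
--
--     start = tuple(lights)
--     target = tuple(0 for _ in lights)
--
--     if start == target:
--         return []
--
--     queue = deque()
--     queue.append((start, []))
--     visited = {start}
--
--     while queue:
--         state, path = queue.popleft()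
--         for button in buttons:
--             next_state = list(state)
--             for idx in button:
--                 next_state[idx] = 1 - next_state[idx]
--             next_state = tuple(next_state)
--             if next_state in visited:
--                 continue
--             next_path = path + [button]
--             if next_state == target:
--                 return next_path
--             visited.add(next_state)
--             queue.append((next_state, next_path))
--
--     return None
-- ===== SOURCE B (Python) =====
-- def calculate_buttons_seq(machine):
--     header = machine[0].strip("[]")
--     start = tuple(0 if ch == "." else 1 for ch in header)
--     n = len(start)
--     target = tuple([0] * n)
--     if start == target:
--         return []
--
--     # Precompute, for every button, its toggle mask over the n lights, so a
--     # press becomes one zip pass instead of repeated indexing.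
--     moves = []
--     for row in machine[1:-1]:
--         button = [int(p) for p in row.strip("()").split(",")]
--         mask = [0] * n
--         for i in button:
--             mask[i] = 1 - mask[i]
--         moves.append((button, mask))
--
--     # BFS with an index pointer into a growing list (no deque), states only;
--     # prev records the (parent, button) edge that first reached each state.
--     order = [start]
--     head = 0
--     prev = {}
--     seen = {start}
--     while head < len(order):
--         state = order[head]
--         head += 1
--         for button, mask in moves:
--             nxt = tuple(1 - v if m else v for v, m in zip(state, mask))
--             if nxt in seen:
--                 continue
--             seen.add(nxt)
--             prev[nxt] = (state, button)
--             if nxt == target: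
--                 seq = []
--                 cur = target
--                 while cur != start:
--                     par, b = prev[cur]
--                     seq.append(b)
--                     cur = par
--                 return seq[::-1]
--             order.append(nxt)
--     return None
-- ===== Notes on version B (the rewrite author's own statement) =====
-- stated objective: alternative
-- what changed: B drops A's deque of (state, path) pairs: it precomputes a toggle mask per button so a press is one zip pass instead of repeated list indexing, runs BFS with an index pointer into a growing list of bare states, records each state's first (parent, button) edge in a prev dict, and reconstructs the answer by walking prev back from the target and reversing, so per-enqueue path copying disappears.
import Mathlib
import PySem

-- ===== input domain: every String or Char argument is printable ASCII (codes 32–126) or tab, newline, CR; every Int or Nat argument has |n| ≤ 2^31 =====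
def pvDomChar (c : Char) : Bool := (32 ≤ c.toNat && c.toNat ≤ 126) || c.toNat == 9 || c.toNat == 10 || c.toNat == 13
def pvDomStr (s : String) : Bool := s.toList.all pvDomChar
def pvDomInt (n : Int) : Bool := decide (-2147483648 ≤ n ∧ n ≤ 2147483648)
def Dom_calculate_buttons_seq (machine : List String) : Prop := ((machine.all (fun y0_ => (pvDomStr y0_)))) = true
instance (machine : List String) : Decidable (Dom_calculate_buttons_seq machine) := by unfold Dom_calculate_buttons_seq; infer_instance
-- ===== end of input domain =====

-- B replaces A's deque of (state, path) pairs by an index-pointer BFS over bare states: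
-- it precomputes a toggle mask per button (press = one zip pass instead of repeated indexing),
-- records for each discovered state its (parent, button) edge in a prev dict, and reconstructs
-- the answer by walking prev back from the target; return value only (no observable mutation).

-- ===== PORT A =====
-- parsing lines of A
def pvParseButton (s : String) : List Int :=
  ((PySem.Str.split? (PySem.Str.stripChars s "()") ",").getD []).map
    (fun p => (PySem.Int.ofStr? p).getD 0)   -- int(p); ofStr? = none is a ValueError, excluded by Pre_

def pvParseLights (s : String) : List Int :=
  (PySem.Str.stripChars s "[]").toList.map (fun c => if c == '.' then (0 : Int) else 1)

-- next_state = state with every index of button toggled (pyGetD/pySetD are exact under Pre_'s in-range condition)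
def pvPress (state : List Int) (button : List Int) : List Int :=
  button.foldl (fun ns idx => PySem.List.pySetD ns idx (1 - PySem.List.pyGetD ns idx 0)) state

-- inner 'for button in buttons' of A: early return (.inl) or the updated (queue, visited) (.inr)
def pvExpandA (target : List Int) (state : List Int) (path : List (List Int)) :
    List (List Int) → List (List Int × List (List Int)) → PySem.Set (List Int) →
    (List (List Int)) ⊕ (List (List Int × List (List Int)) × PySem.Set (List Int))
  | [], queue, visited => .inr (queue, visited)
  | b :: bs, queue, visited =>
    let ns := pvPress state b
    if PySem.Set.contains visited ns then
      pvExpandA target state path bs queue visited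
    else
      let np := path ++ [b]
      if ns == target then .inl np
      else pvExpandA target state path bs (queue ++ [(ns, np)]) (PySem.Set.add visited ns)

-- 'while queue:' of A; the fuel only makes the recursion structural (2^n+2 pops can never be reached)
def pvLoopA (buttons : List (List Int)) (target : List Int) :
    Nat → List (List Int × List (List Int)) → PySem.Set (List Int) → Option (List (List Int))
  | 0, _, _ => none
  | _ + 1, [], _ => none
  | fuel + 1, (state, path) :: rest, visited =>
    match pvExpandA target state path buttons rest visited with
    | .inl res => some res
    | .inr (q, v) => pvLoopA buttons target fuel q v

def calculate_buttons_seq (machine : List String) : Option (List (List Int)) :=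
  let lights := pvParseLights (machine.head?.getD "")  -- machine[0]; [] is an IndexError, excluded by Pre_
  let buttons := (PySem.List.slice machine (some 1) (some (-1))).map pvParseButton
  let target := List.replicate lights.length (0 : Int)
  if lights == target then some []
  else pvLoopA buttons target (2 ^ lights.length + 2) [(lights, [])] (PySem.Set.ofList [lights])

-- ===== PORT B =====
-- start = tuple(0 if ch == "." else 1 for ch in header)
def pvStartB (s : String) : List Int :=
  (PySem.Str.stripChars s "[]").toList.map (fun ch => if ch == '.' then (0 : Int) else 1)

-- mask = [0]*n; for i in button: mask[i] = 1 - mask[i]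
def pvMaskB (n : Nat) (button : List Int) : List Int :=
  button.foldl (fun m i => PySem.List.pySetD m i (1 - PySem.List.pyGetD m i 0)) (List.replicate n 0)

-- the moves list built by the for/append loop over machine[1:-1]
def pvMovesB (n : Nat) (rows : List String) : List (List Int × List Int) :=
  rows.foldl (fun acc row =>
    let button := ((PySem.Str.split? (PySem.Str.stripChars row "()") ",").getD []).map
      (fun p => (PySem.Int.ofStr? p).getD 0)
    acc ++ [(button, pvMaskB n button)]) []

-- nxt = tuple(1 - v if m else v for v, m in zip(state, mask))
def pvZipPress (state mask : List Int) : List Int :=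
  (state.zip mask).map (fun vm => if vm.2 == 0 then vm.1 else 1 - vm.1)

-- the 'while cur != start' backward walk building seq (caller reverses, = seq[::-1]);
-- fuel size(prev)+1 covers any chain prev can hold
def pvBackB (start : List Int) (prev : PySem.Dict (List Int) (List Int × List Int)) :
    Nat → List Int → List (List Int) → List (List Int)
  | 0, _, seq => seq
  | f + 1, cur, seq =>
    if cur == start then seq
    else
      match PySem.Dict.get? prev cur with
      | some (par, b) => pvBackB start prev f par (seq ++ [b])
      | none => seq   -- KeyError guard; unreachable in the algorithm

-- inner 'for button, mask in moves' of B
def pvScanB (target start : List Int) (state : List Int) :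
    List (List Int × List Int) → List (List Int) →
      PySem.Dict (List Int) (List Int × List Int) → PySem.Set (List Int) →
    (List (List Int)) ⊕
      (List (List Int) × PySem.Dict (List Int) (List Int × List Int) × PySem.Set (List Int))
  | [], order, prev, seen => .inr (order, prev, seen)
  | (b, mk) :: ms, order, prev, seen =>
    let ns := pvZipPress state mk
    if PySem.Set.contains seen ns then pvScanB target start state ms order prev seen
    else
      let seen' := PySem.Set.add seen ns
      let prev' := PySem.Dict.insert prev ns (state, b)
      if ns == target then .inl (pvBackB start prev' (PySem.Dict.size prev' + 1) target []).reverse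
      else pvScanB target start state ms (order ++ [ns]) prev' seen'

-- 'while head < len(order):' of B — an index pointer into the growing order list
def pvRunB (moves : List (List Int × List Int)) (target start : List Int) :
    Nat → List (List Int) → Nat →
      PySem.Dict (List Int) (List Int × List Int) → PySem.Set (List Int) →
      Option (List (List Int))
  | 0, _, _, _, _ => none
  | fuel + 1, order, head, prev, seen =>
    if head < order.length then
      match pvScanB target start (order.getD head []) moves order prev seen with
      | .inl res => some res
      | .inr (order', prev', seen') => pvRunB moves target start fuel order' (head + 1) prev' seen'
    else none

def calculate_buttons_seq_alt (machine : List String) : Option (List (List Int)) :=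
  let start := pvStartB (machine.head?.getD "")
  let n := start.length
  let target := List.replicate n (0 : Int)
  if start == target then some []
  else
    let moves := pvMovesB n (PySem.List.slice machine (some 1) (some (-1)))
    pvRunB moves target start (2 ^ n + 2) [start] 0 PySem.Dict.empty (PySem.Set.ofList [start])

-- ===== PRECONDITION & SPEC =====
-- Pre_ excludes exactly the inputs on which A raises: an empty machine (IndexError on machine[0]),
-- a button entry int() cannot parse (ValueError), and a button index outside ±len(lights) (IndexError).
def Pre_calculate_buttons_seq (machine : List String) : Prop :=
  machine ≠ [] ∧
  ((PySem.List.slice machine (some 1) (some (-1))).all (fun s =>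
    ((PySem.Str.split? (PySem.Str.stripChars s "()") ",").getD []).all (fun p =>
      match PySem.Int.ofStr? p with
      | some k =>
          decide (-((pvParseLights (machine.head?.getD "")).length : Int) ≤ k ∧
                  k < ((pvParseLights (machine.head?.getD "")).length : Int))
      | none => false))) = true
instance (machine : List String) : Decidable (Pre_calculate_buttons_seq machine) := by
  unfold Pre_calculate_buttons_seq; infer_instance

def pvWitness_calculate_buttons_seq : List String := ["[#]", "(0)", "{end}"]

def Spec_calculate_buttons_seq (machine : List String) (out : Option (List (List Int))) : Prop :=
  out = calculate_buttons_seq_alt machine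
instance (machine : List String) (out : Option (List (List Int))) :
    Decidable (Spec_calculate_buttons_seq machine out) := by
  unfold Spec_calculate_buttons_seq; infer_instance

-- ===== CLAIM (what is proved, stated in full; the proofs are below) =====
def Claim_equal_calculate_buttons_seq : Prop :=
  ∀ (machine : List String), Dom_calculate_buttons_seq machine →
    Pre_calculate_buttons_seq machine →
    Spec_calculate_buttons_seq machine (calculate_buttons_seq machine)

-- ===== LEMMAS AND PROOFS =====

-- one toggle step, the body both pvPress and pvMaskB fold
def pvToggle (xs : List Int) (i : Int) : List Int :=
  PySem.List.pySetD xs i (1 - PySem.List.pyGetD xs i 0)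

theorem pvIdx_lt {n : Nat} {i : Int} {j : Nat} (h : PySem.List.pyIdx? n i = some j) : j < n := by
  unfold PySem.List.pyIdx? at h
  split_ifs at h <;> simp_all <;> omega

theorem pvToggle_none {xs : List Int} {i : Int}
    (h : PySem.List.pyIdx? xs.length i = none) : pvToggle xs i = xs := by
  simp [pvToggle, PySem.List.pySetD, PySem.List.pySet?, h]

theorem pvToggle_some {xs : List Int} {i : Int} {j : Nat}
    (h : PySem.List.pyIdx? xs.length i = some j) :
    pvToggle xs i = xs.set j (1 - xs.getD j 0) := by
  simp [pvToggle, PySem.List.pySetD, PySem.List.pySet?, PySem.List.pyGetD,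
    PySem.List.pyGet?, h, List.getD]

theorem pvToggle_length (xs : List Int) (i : Int) : (pvToggle xs i).length = xs.length := by
  cases h : PySem.List.pyIdx? xs.length i with
  | none => rw [pvToggle_none h]
  | some j => rw [pvToggle_some h]; simp

theorem pvToggle_01 {xs : List Int} (i : Int) (h01 : ∀ x ∈ xs, x = 0 ∨ x = 1) :
    ∀ x ∈ pvToggle xs i, x = 0 ∨ x = 1 := by
  cases h : PySem.List.pyIdx? xs.length i with
  | none => rw [pvToggle_none h]; exact h01
  | some j =>
    rw [pvToggle_some h]
    intro x hx
    rcases List.mem_or_eq_of_mem_set hx with hx | hx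
    · exact h01 x hx
    · have hj := pvIdx_lt h
      have := h01 (xs.getD j 0) (by rw [List.getD_eq_getElem xs 0 hj]; exact List.getElem_mem hj)
      subst hx
      omega

theorem pvZipPress_length (s m : List Int) :
    (pvZipPress s m).length = min s.length m.length := by
  simp [pvZipPress]

theorem pvZipPress_getElem (s m : List Int) (k : Nat) (hk : k < (pvZipPress s m).length) :
    (pvZipPress s m)[k] =
      if m[k]'(by simp [pvZipPress] at hk; omega) == 0
      then s[k]'(by simp [pvZipPress] at hk; omega)
      else 1 - s[k]'(by simp [pvZipPress] at hk; omega) := by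
  simp [pvZipPress]

theorem pvZipPress_toggle {s m : List Int} (i : Int) (hlen : s.length = m.length)
    (h01 : ∀ x ∈ m, x = 0 ∨ x = 1) :
    pvZipPress s (pvToggle m i) = pvToggle (pvZipPress s m) i := by
  have hzl : (pvZipPress s m).length = m.length := by
    rw [pvZipPress_length, hlen]; omega
  cases h : PySem.List.pyIdx? m.length i with
  | none =>
    rw [pvToggle_none h, pvToggle_none (by rw [hzl]; exact h)]
  | some j =>
    have hj := pvIdx_lt h
    rw [pvToggle_some h, pvToggle_some (by rw [hzl]; exact h)]
    apply List.ext_getElem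
    · rw [pvZipPress_length, List.length_set, List.length_set, pvZipPress_length]
    · intro k hk1 hk2
      have hkm : k < m.length := by
        rw [pvZipPress_length, List.length_set] at hk1; omega
      have hks : k < s.length := by omega
      have hkz : k < (pvZipPress s m).length := by omega
      rw [pvZipPress_getElem s (m.set j (1 - m.getD j 0)) k (by rw [pvZipPress_length]; simp; omega)]
      by_cases hkj : k = j
      · subst hkj
        have hgd : m.getD k 0 = m[k] := List.getD_eq_getElem m 0 hkm
        have hgz : (pvZipPress s m).getD k 0 = (pvZipPress s m)[k] :=
          List.getD_eq_getElem _ 0 hkz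
        simp only [hgd, hgz, List.getElem_set_self, pvZipPress_getElem s m k hkz]
        rcases h01 m[k] (List.getElem_mem hkm) with h0 | h1
        · rw [h0]; norm_num
        · rw [h1]; norm_num
      · have hne : j ≠ k := Ne.symm hkj
        simp only [List.getElem_set_ne hne]
        rw [pvZipPress_getElem s m k hkz]

theorem pvFold_toggle_zip (b : List Int) :
    ∀ (s m : List Int), s.length = m.length → (∀ x ∈ m, x = 0 ∨ x = 1) →
      b.foldl pvToggle (pvZipPress s m) = pvZipPress s (b.foldl pvToggle m) := by
  induction b with
  | nil => intro s m _ _; rfl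
  | cons i b ih =>
    intro s m hlen h01
    simp only [List.foldl_cons]
    rw [← pvZipPress_toggle i hlen h01]
    exact ih s (pvToggle m i) (by rw [hlen, pvToggle_length]) (pvToggle_01 i h01)

theorem pvZipPress_zero (s : List Int) :
    pvZipPress s (List.replicate s.length 0) = s := by
  induction s with
  | nil => rfl
  | cons x s ih => simpa [pvZipPress, List.replicate_succ] using ih

theorem pvPress_eq_zip {state : List Int} {n : Nat} (b : List Int) (hn : state.length = n) :
    pvPress state b = pvZipPress state (pvMaskB n b) := by
  subst hn
  have h := pvFold_toggle_zip b state (List.replicate state.length 0) (by simp)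
    (fun x hx => .inl (List.eq_of_mem_replicate hx))
  rw [pvZipPress_zero] at h
  exact h

theorem pvPress_length (state b : List Int) : (pvPress state b).length = state.length := by
  show (b.foldl pvToggle state).length = state.length
  induction b generalizing state with
  | nil => rfl
  | cons i b ih => simp only [List.foldl_cons]; rw [ih, pvToggle_length]

-- p is the button path that B's prev map encodes from start to s
inductive pvChain (prev : PySem.Dict (List Int) (List Int × List Int)) (start : List Int) :
    List Int → List (List Int) → Prop
  | nil : pvChain prev start start []
  | cons {s t : List Int} {b : List Int} {p : List (List Int)} :
      s ≠ start → PySem.Dict.get? prev s = some (t, b) → pvChain prev start t p →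
      pvChain prev start s (p ++ [b])

-- every key and every recorded parent of prev is a seen state
def pvDictInv (prev : PySem.Dict (List Int) (List Int × List Int))
    (seen : PySem.Set (List Int)) : Prop :=
  ∀ kv ∈ prev.items, kv.1 ∈ seen ∧ kv.2.1 ∈ seen

-- each queued (state, path) of A: prev encodes path to state, state is seen, path fits prev, length n
def pvQInv (n : Nat) (prev : PySem.Dict (List Int) (List Int × List Int))
    (seen : PySem.Set (List Int)) (start : List Int)
    (qA : List (List Int × List (List Int))) : Prop :=
  ∀ e ∈ qA, pvChain prev start e.1 e.2 ∧ e.1 ∈ seen ∧ e.2.length ≤ prev.size ∧ e.1.length = n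

theorem pvChain_insert {prev : PySem.Dict (List Int) (List Int × List Int)}
    {seen : PySem.Set (List Int)} {start s ns : List Int} {v : List Int × List Int}
    {p : List (List Int)}
    (hKV : ∀ kv ∈ prev.items, kv.2.1 ∈ seen) (hs : s ∈ seen) (hns : ns ∉ seen)
    (h : pvChain prev start s p) : pvChain (prev.insert ns v) start s p := by
  induction h with
  | nil => exact pvChain.nil
  | cons hne hget _ ih =>
    rename_i s' t b p' _
    have hsne : s' ≠ ns := fun h => hns (h ▸ hs)
    have ht : t ∈ seen := hKV _ (PySem.Dict.mem_items_of_get?_eq_some _ hget)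
    exact pvChain.cons hne (by rw [PySem.Dict.get?_insert_of_ne prev v hsne]; exact hget)
      (ih ht)

theorem pvBack_spec {prev : PySem.Dict (List Int) (List Int × List Int)}
    {start s : List Int} {p : List (List Int)}
    (h : pvChain prev start s p) :
    ∀ f acc, p.length < f → pvBackB start prev f s acc = acc ++ p.reverse := by
  induction h with
  | nil =>
    intro f acc hf
    cases f with
    | zero => omega
    | succ f => simp [pvBackB]
  | cons hne hget _ ih =>
    rename_i s' t b p' _
    intro f acc hf
    cases f with
    | zero => simp at hf
    | succ f =>
      have hbeq : (s' == start) = false := by simpa using hne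
      simp only [pvBackB, hbeq, Bool.false_eq_true, ite_false, hget]
      rw [ih f (acc ++ [b]) (by simp at hf; omega)]
      simp

theorem pvScan_eq (n : Nat) (target start : List Int) (bs : List (List Int)) :
    ∀ (state : List Int) (path : List (List Int)) qA (order : List (List Int)) (hd : Nat)
      prev seen,
      state.length = n →
      state ∈ seen → start ∈ seen → pvChain prev start state path →
      path.length ≤ PySem.Dict.size prev →
      pvDictInv prev seen → pvQInv n prev seen start qA →
      hd ≤ order.length → order.drop hd = qA.map Prod.fst →
      (∃ r, pvExpandA target state path bs qA seen = .inl r ∧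
            pvScanB target start state (bs.map (fun b => (b, pvMaskB n b))) order prev seen
              = .inl r) ∨
      (∃ qA' order' prev' seen',
         pvExpandA target state path bs qA seen = .inr (qA', seen') ∧
         pvScanB target start state (bs.map (fun b => (b, pvMaskB n b))) order prev seen
           = .inr (order', prev', seen') ∧
         start ∈ seen' ∧ pvDictInv prev' seen' ∧ pvQInv n prev' seen' start qA' ∧
         hd ≤ order'.length ∧ order'.drop hd = qA'.map Prod.fst) := by
  induction bs with
  | nil =>
    intro state path qA order hd prev seen _ _ hsv _ _ hD hQ hhd hrel
    exact .inr ⟨qA, order, prev, seen, rfl, rfl, hsv, hD, hQ, hhd, hrel⟩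
  | cons b bs ih =>
    intro state path qA order hd prev seen hlen hstv hsv hch hplen hD hQ hhd hrel
    have hpress : pvZipPress state (pvMaskB n b) = pvPress state b :=
      (pvPress_eq_zip b hlen).symm
    by_cases hmem : pvPress state b ∈ seen
    · simpa [pvExpandA, pvScanB, hpress, hmem] using
        ih state path qA order hd prev seen hlen hstv hsv hch hplen hD hQ hhd hrel
    · have hKV : ∀ kv ∈ prev.items, kv.2.1 ∈ seen := fun kv hkv => (hD kv hkv).2
      have hfresh : prev.contains (pvPress state b) = false := by
        cases h : prev.contains (pvPress state b)
        · rfl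
        · exfalso
          have : pvPress state b ∈ prev.keys := (PySem.Dict.contains_iff_mem_keys _ _).mp h
          obtain ⟨kv, hkv, hk⟩ := List.mem_map.mp this
          exact hmem (hk ▸ (hD kv hkv).1)
      have hsize : (prev.insert (pvPress state b) (state, b)).size = prev.size + 1 := by
        rw [PySem.Dict.size_insert]
        simp [hfresh]
      have hchain' : pvChain (prev.insert (pvPress state b) (state, b)) start state path :=
        pvChain_insert hKV hstv hmem hch
      have hnsstart : pvPress state b ≠ start := fun h => hmem (h ▸ hsv)
      by_cases htgt : pvPress state b = target
      · rw [htgt] at hmem hchain' hnsstart hsize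
        refine .inl ⟨path ++ [b], ?_, ?_⟩
        · simp [pvExpandA, hmem, htgt]
        · have hchainT : pvChain (prev.insert target (state, b)) start
              target (path ++ [b]) :=
            pvChain.cons hnsstart (PySem.Dict.get?_insert_self _ _ _) hchain'
          have hw := pvBack_spec hchainT
            ((prev.insert target (state, b)).size + 1) []
            (by simp [hsize]; omega)
          simp [pvScanB, hpress, hmem, htgt]
          simpa using hw
      · have hrec := ih state path (qA ++ [(pvPress state b, path ++ [b])])
          (order ++ [pvPress state b]) hd
          (prev.insert (pvPress state b) (state, b)) (PySem.Set.add seen (pvPress state b))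
          hlen
          ((PySem.Set.mem_add _ _ _).mpr (.inl hstv))
          ((PySem.Set.mem_add _ _ _).mpr (.inl hsv))
          hchain'
          (by simp [hsize]; omega)
          (by
            intro kv hkv
            rw [PySem.Dict.items_insert_of_not_contains _ _ hfresh] at hkv
            rcases List.mem_append.mp hkv with h | h
            · obtain ⟨h1, h2⟩ := hD kv h
              exact ⟨(PySem.Set.mem_add _ _ _).mpr (.inl h1),
                     (PySem.Set.mem_add _ _ _).mpr (.inl h2)⟩
            · simp at h
              subst h
              exact ⟨(PySem.Set.mem_add _ _ _).mpr (.inr rfl),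
                     (PySem.Set.mem_add _ _ _).mpr (.inl hstv)⟩)
          (by
            intro e he
            rcases List.mem_append.mp he with h | h
            · obtain ⟨h1, h2, h3, h4⟩ := hQ e h
              exact ⟨pvChain_insert hKV h2 hmem h1,
                     (PySem.Set.mem_add _ _ _).mpr (.inl h2), by omega, h4⟩
            · simp at h
              subst h
              refine ⟨pvChain.cons hnsstart (PySem.Dict.get?_insert_self _ _ _) hchain',
                      (PySem.Set.mem_add _ _ _).mpr (.inr rfl), ?_, ?_⟩
              · simp [hsize]; omega
              · rw [pvPress_length]; exact hlen)
          (by rw [List.length_append]; omega)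
          (by rw [List.drop_append_of_le_length hhd, hrel]; simp)
        rcases hrec with ⟨r, h1, h2⟩ | ⟨qA', order', prev', seen', h1, h2, h3, h4, h5, h6, h7⟩
        · refine .inl ⟨r, ?_, ?_⟩
          · simpa [pvExpandA, hmem, htgt] using h1
          · simpa [pvScanB, hpress, hmem, htgt] using h2
        · refine .inr ⟨qA', order', prev', seen', ?_, ?_, h3, h4, h5, h6, h7⟩
          · simpa [pvExpandA, hmem, htgt] using h1
          · simpa [pvScanB, hpress, hmem, htgt] using h2

theorem pvLoop_eq (n : Nat) (buttons : List (List Int)) (target start : List Int) :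
    ∀ (fuel : Nat) qA (order : List (List Int)) (hd : Nat) prev seen,
      start ∈ seen → pvDictInv prev seen → pvQInv n prev seen start qA →
      hd ≤ order.length → order.drop hd = qA.map Prod.fst →
      pvLoopA buttons target fuel qA seen =
        pvRunB (buttons.map (fun b => (b, pvMaskB n b))) target start fuel order hd prev seen := by
  intro fuel
  induction fuel with
  | zero => intro qA order hd prev seen _ _ _ _ _; rfl
  | succ fuel ih =>
    intro qA order hd prev seen hsv hD hQ hhd hrel
    match hq : qA with
    | [] =>
      have hnil : order.drop hd = [] := by simpa using hrel
      have : ¬ hd < order.length := by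
        have := List.drop_eq_nil_iff.mp hnil
        omega
      simp [pvLoopA, pvRunB, this]
    | (state, path) :: rest =>
      obtain ⟨hch, hstv, hplen, hslen⟩ := hQ (state, path) (by simp)
      have hQr : pvQInv n prev seen start rest := fun e he => hQ e (by simp [he])
      have hlt : hd < order.length := by
        by_contra h
        rw [List.drop_eq_nil_of_le (by omega)] at hrel
        simp at hrel
      have hget : order.getD hd [] = state := by
        have h1 : order[hd]? = some state := by
          rw [← List.head?_drop, hrel]
          rfl
        simp [List.getD, h1]
      have hrel' : order.drop (hd + 1) = rest.map Prod.fst := by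
        rw [← List.tail_drop, hrel]
        rfl
      have h := pvScan_eq n target start buttons state path rest order (hd + 1) prev seen
        hslen hstv hsv hch hplen hD hQr (by omega) hrel'
      rcases h with ⟨r, h1, h2⟩ | ⟨qA', order', prev', seen', h1, h2, h3, h4, h5, h6, h7⟩
      · simp only [pvLoopA, pvRunB, if_pos hlt, hget, h1, h2]
      · simp only [pvLoopA, pvRunB, if_pos hlt, hget, h1, h2]
        exact ih qA' order' (hd + 1) prev' seen' h3 h4 h5 h6 h7

theorem pvInit_mem (l : List Int) : l ∈ PySem.Set.ofList [l] := by
  rw [PySem.Set.mem_ofList]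
  exact List.mem_singleton.mpr rfl

theorem pvInit_dictInv (l : List Int) :
    pvDictInv PySem.Dict.empty (PySem.Set.ofList [l]) := by
  intro kv hkv
  simp [PySem.Dict.empty] at hkv

theorem pvInit_qInv (l : List Int) :
    pvQInv l.length PySem.Dict.empty (PySem.Set.ofList [l]) l [(l, [])] := by
  intro e he
  simp only [List.mem_singleton] at he
  subst he
  exact ⟨pvChain.nil, pvInit_mem l, Nat.zero_le _, rfl⟩

theorem pvMovesB_eq (n : Nat) (rows : List String) :
    pvMovesB n rows = (rows.map pvParseButton).map (fun b => (b, pvMaskB n b)) := by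
  unfold pvMovesB
  have h := PySem.List.foldl_append_singleton_eq_map
    (fun row => (pvParseButton row, pvMaskB n (pvParseButton row))) rows []
  simp only [List.nil_append] at h
  rw [List.map_map]
  exact h

-- ===== VERDICT (by name: the statement is the Claim_ definition above) =====
theorem calculate_buttons_seq_spec : Claim_equal_calculate_buttons_seq := by
  intro machine _ _
  unfold Spec_calculate_buttons_seq calculate_buttons_seq calculate_buttons_seq_alt
  dsimp only
  have hsame : pvStartB (machine.head?.getD "") = pvParseLights (machine.head?.getD "") := rfl
  rw [hsame]
  by_cases h : pvParseLights (machine.head?.getD "") =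
      List.replicate (pvParseLights (machine.head?.getD "")).length 0
  · have hbeq : (pvParseLights (machine.head?.getD "") ==
        List.replicate (pvParseLights (machine.head?.getD "")).length 0) = true := by
      simpa using h
    rw [hbeq]
    rfl
  · have hbeq : (pvParseLights (machine.head?.getD "") ==
        List.replicate (pvParseLights (machine.head?.getD "")).length 0) = false := by
      simpa using h
    simp only [hbeq, Bool.false_eq_true, if_false]
    rw [pvMovesB_eq]
    exact pvLoop_eq _ _ _ _ _ _ _ 0 PySem.Dict.empty _
      (pvInit_mem _) (pvInit_dictInv _) (pvInit_qInv _) (by simp) rfl
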